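-- pv_equiv track=rewrite | github.com/xiaowang1105/algorithms-in-python | Greedy Algorithms, Minimum Spanning Trees, and Dynamic Programming/Hamming_distance_clustering.py | two_bit_flip
-- ===== SOURCE A (Python) =====
-- def two_bit_flip(node):
--     """Give all the nodes by flipping one or two bits of the binary number
--     representation of a node."""
--
--     node_list = list(node)
--     out = set()
--     bit_length = len(node_list)
--     for i in range(bit_length):
--         for j in range(bit_length):
--             new_node = node_list[:]
--             if i != j:
--                 new_node[i] = ('1' if node[i] == '0' else '0')
--                 new_node[j] = ('1' if node[j] == '0' else '0')
--             else:
--                 new_node[i] = ('1' if node[i] == '0' else '0')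
--             out.add(''.join(new_node))
--     return out
-- ===== SOURCE B (Python) =====
-- def two_bit_flip(node):
--     """Give all the nodes by flipping one or two bits of the binary number
--     representation of a node."""
--
--     def flipc(c):
--         return '1' if c == '0' else '0'
--
--     def singles(s):
--         # all strings obtained from s by flipping exactly one position
--         if not s:
--             return []
--         c, rest = s[0], s[1:]
--         return [flipc(c) + rest] + [c + x for x in singles(rest)]
--
--     def variants(s):
--         # all strings obtained from s by flipping one or two positions:
--         # flip the head alone, flip the head together with one later
--         # position, or keep the head and recurse on the tail
--         if not s:
--             return []
--         c, rest = s[0], s[1:]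
--         return ([flipc(c) + rest]
--                 + [flipc(c) + x for x in singles(rest)]
--                 + [c + y for y in variants(rest)])
--
--     return set(variants(node))
-- ===== Notes on version B (the rewrite author's own statement) =====
-- stated objective: alternative
-- what changed: A sweeps the full n x n index grid, mutating a copied char list with an i==j branch and relying on the set to absorb the duplicate (j,i) candidates; B has no index loops at all: it recurses on the string structure with two mutually composed recursive functions (singles = exactly-one-flip suffix variants, variants = flip head alone / head plus one later position / keep head and recurse), producing every result exactly once by string concatenation.
import Mathlib
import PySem

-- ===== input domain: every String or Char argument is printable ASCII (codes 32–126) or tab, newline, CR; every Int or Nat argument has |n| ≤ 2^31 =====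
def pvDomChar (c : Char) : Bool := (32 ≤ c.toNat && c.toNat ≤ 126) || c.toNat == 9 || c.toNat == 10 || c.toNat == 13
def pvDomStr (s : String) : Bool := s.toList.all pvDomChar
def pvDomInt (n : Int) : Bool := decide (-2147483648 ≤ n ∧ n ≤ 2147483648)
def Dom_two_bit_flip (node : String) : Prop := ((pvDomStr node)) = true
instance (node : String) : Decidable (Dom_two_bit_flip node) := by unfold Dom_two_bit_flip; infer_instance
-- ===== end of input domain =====

-- B replaces A's full n×n index grid (set-mutation with an i==j branch, set-dedup of
-- the duplicate (j,i) candidates) by a structural recursion on the string: two mutually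
-- composed recursive functions (exactly-one-flip suffix variants, and one-or-two-flip
-- variants) that build each result once by concatenation (objective: alternative).


-- ===== PORT A =====
-- '1' if c == '0' else '0'  (the flip rule both Pythons use)
def pvFlipChar (c : Char) : Char := if c = '0' then '1' else '0'

def two_bit_flip (node : String) : List String :=
  let node_list := node.toList
  let bit_length := node_list.length
  (List.range bit_length).foldl (fun out i =>
    (List.range bit_length).foldl (fun out j =>
      let new_node :=
        if i ≠ j then
          (node_list.set i (pvFlipChar (node_list.getD i ' '))).set j
            (pvFlipChar (node_list.getD j ' '))
        else
          node_list.set i (pvFlipChar (node_list.getD i ' '))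
      PySem.Set.add out (String.ofList new_node)) out) []

-- ===== PORT B =====
-- strings are char lists here: Python's one-char concatenation c + x is the cons c :: x

-- singles(s): all strings got from s by flipping exactly one position
def pvSinglesB : List Char → List (List Char)
  | [] => []
  | c :: rest => (pvFlipChar c :: rest) :: (pvSinglesB rest).map (fun x => c :: x)

-- variants(s): flip the head alone, flip the head plus one later position, or keep the head and recurse
def pvVariantsB : List Char → List (List Char)
  | [] => []
  | c :: rest =>
      (pvFlipChar c :: rest) ::
        ((pvSinglesB rest).map (fun x => pvFlipChar c :: x) ++
         (pvVariantsB rest).map (fun y => c :: y))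

def two_bit_flip_alt (node : String) : List String :=
  PySem.Set.ofList ((pvVariantsB node.toList).map String.ofList)

-- ===== PRECONDITION & SPEC =====
def Spec_two_bit_flip (node : String) (out : List String) : Prop := out = two_bit_flip_alt node
instance (node : String) (out : List String) : Decidable (Spec_two_bit_flip node out) := by unfold Spec_two_bit_flip; infer_instance

-- ===== CLAIM (what is proved, stated in full; the proofs are below) =====
def Claim_equal_two_bit_flip : Prop := ∀ (node : String), Dom_two_bit_flip node → Spec_two_bit_flip node (two_bit_flip node)

-- ===== LEMMAS AND PROOFS =====

-- the single flip of l at i, the double flip at i and j (original chars), and the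
-- list of distinct results in first-insertion order after i outer iterations of A
def pvG (l : List Char) (i : Nat) : List Char := l.set i (pvFlipChar (l.getD i ' '))
def pvD (l : List Char) (i j : Nat) : List Char := (pvG l i).set j (pvFlipChar (l.getD j ' '))
def pvBlock (l : List Char) (i : Nat) : List String :=
  String.ofList (pvG l i) :: (List.range' (i + 1) (l.length - (i + 1))).map (fun j => String.ofList (pvD l i j))
def pvL (l : List Char) (i : Nat) : List String := (List.range i).flatMap (pvBlock l)

theorem pvFlipChar_ne (c : Char) : pvFlipChar c ≠ c := by
  unfold pvFlipChar; split_ifs with h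
  · rw [h]; decide
  · exact fun e => h e.symm

theorem getD_set_lt {l : List Char} {i : Nat} (c : Char) {p : Nat} (hi : i < l.length) :
    (l.set i c).getD p ' ' = if p = i then c else l.getD p ' ' := by
  rcases eq_or_ne p i with rfl | h
  · simp [List.getD_eq_getElem?_getD, hi]
  · simp [List.getD_eq_getElem?_getD, List.getElem?_set_ne (Ne.symm h), h]

theorem gG {l : List Char} {i : Nat} (p : Nat) (hi : i < l.length) :
    (pvG l i).getD p ' ' = if p = i then pvFlipChar (l.getD i ' ') else l.getD p ' ' :=
  getD_set_lt _ hi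

theorem len_pvG (l : List Char) (i : Nat) : (pvG l i).length = l.length := by
  simp [pvG]

theorem gD {l : List Char} {i j : Nat} (p : Nat) (hi : i < l.length) (hj : j < l.length)
    (hij : i ≠ j) :
    (pvD l i j).getD p ' ' =
      if p = j then pvFlipChar (l.getD j ' ')
      else if p = i then pvFlipChar (l.getD i ' ') else l.getD p ' ' := by
  unfold pvD
  rw [getD_set_lt _ (by rw [len_pvG]; exact hj)]
  rcases eq_or_ne p j with rfl | h
  · simp
  · rw [if_neg h, if_neg h, gG p hi]

theorem ofList_inj {a b : List Char} (h : String.ofList a = String.ofList b) : a = b := by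
  simpa using congrArg String.toList h

-- single flips at distinct positions differ
theorem pvG_ne {l : List Char} {i k : Nat} (hi : i < l.length) (hk : k < l.length) (hik : i ≠ k) :
    String.ofList (pvG l i) ≠ String.ofList (pvG l k) := by
  intro h
  have e : (pvG l i).getD i ' ' = (pvG l k).getD i ' ' :=
    congrArg (fun t => t.getD i ' ') (ofList_inj h)
  rw [gG i hi, gG i hk, if_pos rfl, if_neg hik] at e
  exact pvFlipChar_ne _ e

-- a double flip never equals a single flip
theorem pvD_ne_pvG {l : List Char} {i j k : Nat} (hi : i < l.length) (hj : j < l.length)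
    (hk : k < l.length) (hij : i < j) :
    String.ofList (pvD l i j) ≠ String.ofList (pvG l k) := by
  intro h
  have hij' : i ≠ j := Nat.ne_of_lt hij
  rcases eq_or_ne k i with hki | hki
  · have e : (pvD l i j).getD j ' ' = (pvG l k).getD j ' ' :=
      congrArg (fun t => t.getD j ' ') (ofList_inj h)
    rw [gD j hi hj hij', gG j hk, if_pos rfl, if_neg (show ¬ j = k by omega)] at e
    exact pvFlipChar_ne _ e
  · have e : (pvD l i j).getD i ' ' = (pvG l k).getD i ' ' :=
      congrArg (fun t => t.getD i ' ') (ofList_inj h)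
    rw [gD i hi hj hij', gG i hk, if_neg hij', if_pos rfl, if_neg (Ne.symm hki)] at e
    exact pvFlipChar_ne _ e

-- double flips at distinct unordered pairs differ
theorem pvD_inj {l : List Char} {i j k m : Nat} (hi : i < l.length) (hj : j < l.length)
    (hk : k < l.length) (hm : m < l.length) (hij : i < j) (hkm : k < m)
    (h : String.ofList (pvD l i j) = String.ofList (pvD l k m)) : i = k ∧ j = m := by
  have hij' : i ≠ j := Nat.ne_of_lt hij
  have hkm' : k ≠ m := Nat.ne_of_lt hkm
  have e := ofList_inj h
  have vi : (pvD l i j).getD i ' ' = (pvD l k m).getD i ' ' :=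
    congrArg (fun t => t.getD i ' ') e
  have vj : (pvD l i j).getD j ' ' = (pvD l k m).getD j ' ' :=
    congrArg (fun t => t.getD j ' ') e
  rw [gD i hi hj hij', gD i hk hm hkm', if_neg hij', if_pos rfl] at vi
  rw [gD j hi hj hij', gD j hk hm hkm', if_pos rfl] at vj
  have h1 : i = m ∨ i = k := by
    by_contra hc
    push Not at hc
    rw [if_neg hc.1, if_neg hc.2] at vi
    exact pvFlipChar_ne _ vi
  have h2 : j = m ∨ j = k := by
    by_contra hc
    push Not at hc
    rw [if_neg hc.1, if_neg hc.2] at vj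
    exact pvFlipChar_ne _ vj
  rcases h1 with rfl | rfl <;> rcases h2 with e2 | e2 <;> omega

theorem pvD_comm {l : List Char} {i j : Nat} (hij : i ≠ j) : pvD l i j = pvD l j i := by
  unfold pvD pvG
  exact List.set_comm _ _ hij

theorem mem_pvL {l : List Char} {i : Nat} (hin : i ≤ l.length) {x : String} :
    x ∈ pvL l i ↔ ∃ k, k < i ∧ (x = String.ofList (pvG l k) ∨
      ∃ j, k < j ∧ j < l.length ∧ x = String.ofList (pvD l k j)) := by
  simp only [pvL, List.mem_flatMap, List.mem_range, pvBlock, List.mem_cons, List.mem_map,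
    List.mem_range']
  constructor
  · rintro ⟨k, hk, h | ⟨j, ⟨a, ha, rfl⟩, rfl⟩⟩
    · exact ⟨k, hk, Or.inl h⟩
    · refine ⟨k, hk, Or.inr ⟨k + 1 + 1 * a, ?_, ?_, rfl⟩⟩ <;> omega
  · rintro ⟨k, hk, h | ⟨j, hkj, hjn, rfl⟩⟩
    · exact ⟨k, hk, Or.inl h⟩
    · exact ⟨k, hk, Or.inr ⟨j, ⟨j - (k + 1), by omega, by omega⟩, rfl⟩⟩

theorem foldl_add_skip {f : Nat → String} {js : List Nat} {acc : List String}
    (h : ∀ j ∈ js, f j ∈ acc) :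
    js.foldl (fun a j => PySem.Set.add a (f j)) acc = acc := by
  induction js generalizing acc with
  | nil => rfl
  | cons j js ih =>
    simp only [List.foldl_cons]
    rw [PySem.Set.add_of_mem (h j (by simp))]
    exact ih (fun j' hj' => h j' (by simp [hj']))

theorem foldl_add_run {f : Nat → String} {js : List Nat} {acc : List String}
    (hnd : (js.map f).Nodup) (h : ∀ j ∈ js, f j ∉ acc) :
    js.foldl (fun a j => PySem.Set.add a (f j)) acc = acc ++ js.map f := by
  induction js generalizing acc with
  | nil => simp
  | cons j js ih =>
    simp only [List.foldl_cons, List.map_cons]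
    rw [PySem.Set.add_of_not_mem (h j (by simp))]
    have hnotin : ∀ j' ∈ js, f j' ∉ acc ++ [f j] := by
      intro j' hj'
      simp only [List.mem_append, List.mem_singleton]
      rintro (hm | hm)
      · exact h j' (by simp [hj']) hm
      · exact (List.nodup_cons.mp hnd).1 (by rw [← hm]; exact List.mem_map_of_mem hj')
    rw [ih (List.nodup_cons.mp hnd).2 hnotin]
    simp

theorem pvL_succ (l : List Char) (i : Nat) : pvL l (i + 1) = pvL l i ++ pvBlock l i := by
  simp [pvL, List.range_succ]

-- the single flip at i is new after i outer iterations
theorem sG_not_mem {l : List Char} {i : Nat} (hi : i < l.length) :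
    String.ofList (pvG l i) ∉ pvL l i := by
  rw [mem_pvL (Nat.le_of_lt hi)]
  rintro ⟨k, hk, h | ⟨j, hkj, hjn, h⟩⟩
  · exact pvG_ne (by omega) hi (by omega) h.symm
  · exact pvD_ne_pvG (by omega) hjn hi hkj h.symm

-- the double flip at i<j is new after i outer iterations plus the single flip at i
theorem dij_not_mem {l : List Char} {i j : Nat} (hi : i < l.length) (hj : j < l.length)
    (hij : i < j) :
    String.ofList (pvD l i j) ∉ pvL l i ++ [String.ofList (pvG l i)] := by
  simp only [List.mem_append, List.mem_singleton]
  rintro (hm | hm)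
  · rw [mem_pvL (Nat.le_of_lt hi)] at hm
    rcases hm with ⟨k, hk, h | ⟨j', hkj', hj'n, h⟩⟩
    · exact pvD_ne_pvG hi hj (by omega) hij h
    · have := pvD_inj hi hj (by omega) hj'n hij hkj' h
      omega
  · exact pvD_ne_pvG hi hj hi hij hm

theorem nodup_dmap {l : List Char} {i : Nat} (hi : i < l.length) :
    ((List.range' (i + 1) (l.length - (i + 1))).map
      (fun j => String.ofList (pvD l i j))).Nodup := by
  rw [List.nodup_map_iff_inj_on (List.nodup_range' 1)]
  intro a ha b hb hfab
  simp only [List.mem_range'] at ha hb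
  obtain ⟨x, hx, rfl⟩ := ha
  obtain ⟨y, hy, rfl⟩ := hb
  have := pvD_inj hi (by omega) hi (by omega) (by omega) (by omega) hfab
  omega

-- one outer iteration of A's port
theorem A_inner {l : List Char} {i : Nat} (hi : i < l.length) :
    (List.range l.length).foldl (fun out j =>
      PySem.Set.add out (String.ofList (if i ≠ j then pvD l i j else pvG l i))) (pvL l i)
      = pvL l (i + 1) := by
  have hsplit : List.range l.length =
      List.range' 0 i ++ i :: List.range' (i + 1) (l.length - (i + 1)) := by
    rw [List.range_eq_range']
    have h1 : List.range' 0 i ++ List.range' (0 + 1 * i) (l.length - i) 1 =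
        List.range' 0 (i + (l.length - i)) := List.range'_append
    have h2 : l.length - i = (l.length - (i + 1)) + 1 := by omega
    rw [h2, List.range'_succ] at h1
    simp only [Nat.zero_add, Nat.one_mul] at h1
    conv_lhs => rw [show l.length = i + (l.length - (i + 1) + 1) from by omega]
    exact h1.symm
  rw [hsplit, List.foldl_append, List.foldl_cons]
  have hmapA : (List.range' (i + 1) (l.length - (i + 1))).map
      (fun j => String.ofList (if i ≠ j then pvD l i j else pvG l i))
      = (List.range' (i + 1) (l.length - (i + 1))).map
        (fun j => String.ofList (pvD l i j)) := by
    refine List.map_congr_left ?_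
    intro j hj
    simp only [List.mem_range'] at hj
    obtain ⟨a, ha, rfl⟩ := hj
    rw [if_pos (by omega : i ≠ i + 1 + 1 * a)]
  have hskip : List.foldl (fun out j =>
      PySem.Set.add out (String.ofList (if i ≠ j then pvD l i j else pvG l i))) (pvL l i)
      (List.range' 0 i) = pvL l i := by
    refine foldl_add_skip ?_
    intro j hj
    simp only [List.mem_range'] at hj
    obtain ⟨a, ha, rfl⟩ := hj
    rw [if_pos (by omega : i ≠ 0 + 1 * a), pvD_comm (by omega : i ≠ 0 + 1 * a)]
    rw [mem_pvL (Nat.le_of_lt hi)]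
    exact ⟨0 + 1 * a, by omega, Or.inr ⟨i, by omega, hi, rfl⟩⟩
  have hrun : List.foldl (fun out j =>
      PySem.Set.add out (String.ofList (if i ≠ j then pvD l i j else pvG l i)))
      (pvL l i ++ [String.ofList (pvG l i)]) (List.range' (i + 1) (l.length - (i + 1)))
      = (pvL l i ++ [String.ofList (pvG l i)]) ++
        (List.range' (i + 1) (l.length - (i + 1))).map
          (fun j => String.ofList (if i ≠ j then pvD l i j else pvG l i)) := by
    refine foldl_add_run ?_ ?_
    · rw [hmapA]
      exact nodup_dmap hi
    · intro j hj
      simp only [List.mem_range'] at hj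
      obtain ⟨a, ha, rfl⟩ := hj
      rw [if_pos (by omega : i ≠ i + 1 + 1 * a)]
      exact dij_not_mem hi (by omega) (by omega)
  rw [hskip, if_neg (by simp : ¬ i ≠ i), PySem.Set.add_of_not_mem (sG_not_mem hi), hrun, hmapA]
  rw [pvL_succ]
  simp [pvBlock]

theorem A_outer (l : List Char) : ∀ m, m ≤ l.length →
    (List.range m).foldl (fun out i =>
      (List.range l.length).foldl (fun out j =>
        PySem.Set.add out (String.ofList (if i ≠ j then pvD l i j else pvG l i))) out) []
      = pvL l m := by
  intro m
  induction m with
  | zero => intro _; rfl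
  | succ m ih =>
    intro hm
    rw [List.range_succ, List.foldl_append, ih (by omega), List.foldl_cons, List.foldl_nil]
    exact A_inner (by omega)

theorem A_eval (node : String) : two_bit_flip node = pvL node.toList node.toList.length := by
  have h := A_outer node.toList node.toList.length le_rfl
  unfold two_bit_flip
  exact h ▸ (by rfl)

-- ===== B side: the structural recursion builds exactly pvL, in the same order =====

theorem pvG_cons_zero (c : Char) (rest : List Char) :
    pvG (c :: rest) 0 = pvFlipChar c :: rest := by
  simp [pvG]

theorem pvG_cons_succ (c : Char) (rest : List Char) (i : Nat) :
    pvG (c :: rest) (i + 1) = c :: pvG rest i := by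
  simp [pvG, List.getD]

theorem pvD_cons_succ (c : Char) (rest : List Char) (i j : Nat) :
    pvD (c :: rest) (i + 1) (j + 1) = c :: pvD rest i j := by
  simp [pvD, pvG_cons_succ, List.getD]

theorem pvD_cons_zero_succ (c : Char) (rest : List Char) (j : Nat) :
    pvD (c :: rest) 0 (j + 1) = pvFlipChar c :: pvG rest j := by
  simp [pvD, pvG, List.getD]

theorem singles_eq (l : List Char) :
    pvSinglesB l = (List.range l.length).map (pvG l) := by
  induction l with
  | nil => rfl
  | cons c rest ih =>
    simp only [pvSinglesB, List.length_cons, List.range_succ_eq_map, List.map_cons,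
      List.map_map, ih, pvG_cons_zero]
    congr 1

theorem pvBlock_cons_succ (c : Char) (rest : List Char) (i : Nat) :
    pvBlock (c :: rest) (i + 1)
      = (pvBlock rest i).map (fun s => String.ofList (c :: s.toList)) := by
  simp only [pvBlock, List.length_cons, List.map_cons, List.map_map, pvG_cons_succ]
  congr 1
  · simp
  · have harith : (rest.length + 1) - (i + 1 + 1) = rest.length - (i + 1) := by omega
    rw [harith, List.range'_eq_map_range, List.range'_eq_map_range, List.map_map, List.map_map]
    refine List.map_congr_left ?_
    intro a _
    simp only [Function.comp]
    rw [show i + 1 + 1 + a = (i + 1 + a) + 1 from by omega, pvD_cons_succ]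
    simp

theorem pvBlock_cons_zero (c : Char) (rest : List Char) :
    pvBlock (c :: rest) 0
      = String.ofList (pvFlipChar c :: rest) ::
          (List.range rest.length).map (fun i => String.ofList (pvFlipChar c :: pvG rest i)) := by
  simp only [pvBlock, List.length_cons, pvG_cons_zero, Nat.add_sub_cancel]
  congr 1
  rw [List.range'_eq_map_range, List.map_map]
  refine List.map_congr_left ?_
  intro a _
  simp only [Function.comp]
  rw [show 0 + 1 + a = a + 1 from by omega, pvD_cons_zero_succ]

theorem variants_eq (l : List Char) :
    (pvVariantsB l).map String.ofList = pvL l l.length := by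
  induction l with
  | nil => rfl
  | cons c rest ih =>
    have hL : pvL (c :: rest) (rest.length + 1)
        = pvBlock (c :: rest) 0 ++
            (pvL rest rest.length).map (fun s => String.ofList (c :: s.toList)) := by
      simp only [pvL, List.range_succ_eq_map, List.flatMap_cons, List.flatMap_map]
      congr 1
      rw [List.map_flatMap]
      refine List.flatMap_congr ?_
      intro i _
      exact pvBlock_cons_succ c rest i
    simp only [pvVariantsB, List.length_cons, hL, pvBlock_cons_zero]
    simp only [List.map_cons, List.map_append, List.map_map, List.cons_append]
    congr 1
    congr 1
    · rw [singles_eq, List.map_map]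
      refine List.map_congr_left ?_
      intro i _
      simp [Function.comp]
    · rw [← ih, List.map_map]
      refine List.map_congr_left ?_
      intro y _
      simp [Function.comp]

theorem nodup_pvBlock {l : List Char} {i : Nat} (hi : i < l.length) :
    (pvBlock l i).Nodup := by
  rw [pvBlock, List.nodup_cons]
  refine ⟨?_, nodup_dmap hi⟩
  intro hm
  obtain ⟨j, hj, e⟩ := List.mem_map.mp hm
  simp only [List.mem_range'] at hj
  obtain ⟨a, ha, rfl⟩ := hj
  exact pvD_ne_pvG hi (by omega) hi (by omega) e

theorem nodup_pvL (l : List Char) : ∀ m, m ≤ l.length → (pvL l m).Nodup := by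
  intro m
  induction m with
  | zero => intro _; exact List.nodup_nil
  | succ m ih =>
    intro hm
    rw [pvL_succ]
    refine List.Nodup.append (ih (by omega)) (nodup_pvBlock (by omega)) ?_
    intro x hx hx'
    rcases List.mem_cons.mp hx' with rfl | hx''
    · exact sG_not_mem (show m < l.length by omega) hx
    · obtain ⟨j, hj, rfl⟩ := List.mem_map.mp hx''
      simp only [List.mem_range'] at hj
      obtain ⟨a, ha, rfl⟩ := hj
      exact dij_not_mem (show m < l.length by omega) (by omega) (by omega)
        (List.mem_append_left _ hx)

theorem ofList_of_nodup : ∀ (xs acc : List String), (∀ x ∈ xs, x ∉ acc) → xs.Nodup →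
    xs.foldl PySem.Set.add acc = acc ++ xs := by
  intro xs
  induction xs with
  | nil => intro acc _ _; simp
  | cons x xs ih =>
    intro acc hdisj hnd
    simp only [List.foldl_cons]
    rw [PySem.Set.add_of_not_mem (hdisj x (by simp))]
    rw [ih (acc ++ [x]) ?_ (List.nodup_cons.mp hnd).2]
    · simp
    · intro y hy
      simp only [List.mem_append, List.mem_singleton]
      rintro (hm | rfl)
      · exact hdisj y (by simp [hy]) hm
      · exact (List.nodup_cons.mp hnd).1 hy

theorem B_eval (node : String) :
    two_bit_flip_alt node = pvL node.toList node.toList.length := by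
  unfold two_bit_flip_alt
  rw [variants_eq]
  have h := ofList_of_nodup (pvL node.toList node.toList.length) []
    (by intro x _ hx; simp at hx) (nodup_pvL node.toList node.toList.length le_rfl)
  simpa [PySem.Set.ofList_eq_foldl] using h

-- ===== VERDICT (by name: the statement is the Claim_ definition above) =====
theorem two_bit_flip_spec : Claim_equal_two_bit_flip := by
  intro node _
  unfold Spec_two_bit_flip
  rw [A_eval, B_eval]
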